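-- pv_equiv track=rewrite | github.com/biohackingmathematician/oocyte-aging | scripts/compare_to_literature.py | categorize_genes
-- ===== SOURCE A (Python) =====
-- def categorize_genes(genes):
--     """
--     Categorize genes by function based on literature knowledge.
--
--     Parameters
--     ----------
--     genes : list
--         Gene symbols
--
--     Returns
--     -------
--     dict : Gene categories
--     """
--     categories = {
--         'proteasome': [],
--         'ubiquitination': [],
--         'mitochondrial': [],
--         'cell_cycle': [],
--         'dna_repair': [],
--         'rna_processing': [],
--         'other': []
--     }
--
--     proteasome_genes = [g for g in genes if 'PSMA' in g.upper() or 'PSMB' in g.upper()]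
--     categories['proteasome'] = proteasome_genes
--
--     ubiquitination_genes = [g for g in genes if 'UBE' in g.upper() or 'UB' in g.upper()]
--     categories['ubiquitination'] = [g for g in ubiquitination_genes if g not in proteasome_genes]
--
--     mitochondrial_genes = [g for g in genes if any(m in g.upper() for m in ['VDAC', 'COX', 'ATP', 'NDUF', 'SOD', 'GPX', 'CYCS'])]
--     categories['mitochondrial'] = mitochondrial_genes
--
--     cell_cycle_genes = [g for g in genes if any(c in g.upper() for c in ['DUT', 'PCNA', 'TOP2', 'MCM', 'CDK', 'CCNB'])]
--     categories['cell_cycle'] = cell_cycle_genes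
--
--     dna_repair_genes = [g for g in genes if any(d in g.upper() for d in ['ATM', 'CHEK', 'TP53', 'BRCA'])]
--     categories['dna_repair'] = dna_repair_genes
--
--     rna_processing_genes = [g for g in genes if any(r in g.upper() for r in ['HNRNP', 'MAGOH', 'RNA'])]
--     categories['rna_processing'] = rna_processing_genes
--
--     categorized = set()
--     for cat_genes in categories.values():
--         categorized.update(cat_genes)
--
--     categories['other'] = [g for g in genes if g.upper() not in categorized]
--
--     return categories
-- ===== SOURCE B (Python) =====
-- def categorize_genes(genes):
--     """Single pass: compute g.upper() once per gene and test each category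
--     predicate directly, instead of seven separate scans with an inner
--     list-membership scan for the ubiquitination exclusion."""
--     prot, ubiq, mito, cc, dr, rna = [], [], [], [], [], []
--     for g in genes:
--         gu = g.upper()
--         is_prot = 'PSMA' in gu or 'PSMB' in gu
--         if is_prot:
--             prot.append(g)
--         if ('UBE' in gu or 'UB' in gu) and not is_prot:
--             ubiq.append(g)
--         if any(m in gu for m in ('VDAC', 'COX', 'ATP', 'NDUF', 'SOD', 'GPX', 'CYCS')):
--             mito.append(g)
--         if any(c in gu for c in ('DUT', 'PCNA', 'TOP2', 'MCM', 'CDK', 'CCNB')):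
--             cc.append(g)
--         if any(d in gu for d in ('ATM', 'CHEK', 'TP53', 'BRCA')):
--             dr.append(g)
--         if any(r in gu for r in ('HNRNP', 'MAGOH', 'RNA')):
--             rna.append(g)
--     categorized = set(prot + ubiq + mito + cc + dr + rna)
--     other = [g for g in genes if g.upper() not in categorized]
--     return {
--         'proteasome': prot,
--         'ubiquitination': ubiq,
--         'mitochondrial': mito,
--         'cell_cycle': cc,
--         'dna_repair': dr,
--         'rna_processing': rna,
--         'other': other,
--     }
-- ===== Notes on version B (the rewrite author's own statement) =====
-- stated objective: alternative
-- what changed: Seven separate list-comprehension scans (with an inner 'g not in proteasome_genes' list scan) are replaced by one pass over genes that computes g.upper() once per gene and appends to six accumulators, plus one set-lookup pass for 'other'.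
import Mathlib
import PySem

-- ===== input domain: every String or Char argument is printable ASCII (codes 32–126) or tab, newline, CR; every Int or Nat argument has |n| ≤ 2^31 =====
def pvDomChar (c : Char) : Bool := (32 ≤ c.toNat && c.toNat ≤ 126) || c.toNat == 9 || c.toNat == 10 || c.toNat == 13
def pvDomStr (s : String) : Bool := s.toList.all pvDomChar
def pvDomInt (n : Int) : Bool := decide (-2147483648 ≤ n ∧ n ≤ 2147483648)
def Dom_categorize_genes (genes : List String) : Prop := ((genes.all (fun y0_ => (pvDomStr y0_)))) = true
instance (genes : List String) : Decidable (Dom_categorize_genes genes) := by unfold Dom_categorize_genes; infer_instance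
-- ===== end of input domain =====

-- B replaces A's seven scans (and the inner 'g not in proteasome_genes' list scan) by a
-- single pass over genes with six accumulators; same return value.

-- ===== PORT A =====
def categorize_genes (genes : List String) : List (String × List String) :=
  let proteasome_genes := genes.filter (fun g =>
    PySem.Str.isIn "PSMA" (PySem.Str.upper g) || PySem.Str.isIn "PSMB" (PySem.Str.upper g))
  let ubiquitination_genes := genes.filter (fun g =>
    PySem.Str.isIn "UBE" (PySem.Str.upper g) || PySem.Str.isIn "UB" (PySem.Str.upper g))
  let ubi := ubiquitination_genes.filter (fun g => !(proteasome_genes.contains g))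
  let mitochondrial_genes := genes.filter (fun g =>
    (["VDAC", "COX", "ATP", "NDUF", "SOD", "GPX", "CYCS"].any (fun m => PySem.Str.isIn m (PySem.Str.upper g))))
  let cell_cycle_genes := genes.filter (fun g =>
    (["DUT", "PCNA", "TOP2", "MCM", "CDK", "CCNB"].any (fun c => PySem.Str.isIn c (PySem.Str.upper g))))
  let dna_repair_genes := genes.filter (fun g =>
    (["ATM", "CHEK", "TP53", "BRCA"].any (fun d => PySem.Str.isIn d (PySem.Str.upper g))))
  let rna_processing_genes := genes.filter (fun g =>
    (["HNRNP", "MAGOH", "RNA"].any (fun r => PySem.Str.isIn r (PySem.Str.upper g))))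
  -- categorized = set(); for cat_genes in categories.values(): categorized.update(cat_genes)
  let categorized := [proteasome_genes, ubi, mitochondrial_genes, cell_cycle_genes,
    dna_repair_genes, rna_processing_genes, ([] : List String)].foldl PySem.Set.update PySem.Set.empty
  let other := genes.filter (fun g => !(PySem.Set.contains categorized (PySem.Str.upper g)))
  [("proteasome", proteasome_genes), ("ubiquitination", ubi), ("mitochondrial", mitochondrial_genes),
   ("cell_cycle", cell_cycle_genes), ("dna_repair", dna_repair_genes),
   ("rna_processing", rna_processing_genes), ("other", other)]

-- ===== PORT B =====
-- one loop iteration of Source B: append g to each accumulator whose predicate fires on gu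
def catStep (st : List String × List String × List String × List String × List String × List String)
    (g : String) : List String × List String × List String × List String × List String × List String :=
  let gu := PySem.Str.upper g
  let isProt := PySem.Str.isIn "PSMA" gu || PySem.Str.isIn "PSMB" gu
  ((if isProt then st.1 ++ [g] else st.1),
   (if (PySem.Str.isIn "UBE" gu || PySem.Str.isIn "UB" gu) && !isProt then st.2.1 ++ [g] else st.2.1),
   (if ["VDAC", "COX", "ATP", "NDUF", "SOD", "GPX", "CYCS"].any (fun m => PySem.Str.isIn m gu)
      then st.2.2.1 ++ [g] else st.2.2.1),
   (if ["DUT", "PCNA", "TOP2", "MCM", "CDK", "CCNB"].any (fun c => PySem.Str.isIn c gu)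
      then st.2.2.2.1 ++ [g] else st.2.2.2.1),
   (if ["ATM", "CHEK", "TP53", "BRCA"].any (fun d => PySem.Str.isIn d gu)
      then st.2.2.2.2.1 ++ [g] else st.2.2.2.2.1),
   (if ["HNRNP", "MAGOH", "RNA"].any (fun r => PySem.Str.isIn r gu)
      then st.2.2.2.2.2 ++ [g] else st.2.2.2.2.2))

def categorize_genes_alt (genes : List String) : List (String × List String) :=
  let r := genes.foldl catStep ([], [], [], [], [], [])
  let categorized := PySem.Set.ofList (r.1 ++ r.2.1 ++ r.2.2.1 ++ r.2.2.2.1 ++ r.2.2.2.2.1 ++ r.2.2.2.2.2)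
  let other := genes.filter (fun g => !(PySem.Set.contains categorized (PySem.Str.upper g)))
  [("proteasome", r.1), ("ubiquitination", r.2.1), ("mitochondrial", r.2.2.1),
   ("cell_cycle", r.2.2.2.1), ("dna_repair", r.2.2.2.2.1),
   ("rna_processing", r.2.2.2.2.2), ("other", other)]

-- ===== PRECONDITION & SPEC =====
def Spec_categorize_genes (genes : List String) (out : List (String × List String)) : Prop := out = categorize_genes_alt genes
instance (genes : List String) (out : List (String × List String)) : Decidable (Spec_categorize_genes genes out) := by unfold Spec_categorize_genes; infer_instance

-- ===== CLAIM (what is proved, stated in full; the proofs are below) =====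
def Claim_equal_categorize_genes : Prop := ∀ (genes : List String), Dom_categorize_genes genes → Spec_categorize_genes genes (categorize_genes genes)

-- ===== LEMMAS AND PROOFS =====

set_option maxHeartbeats 1000000 in
theorem foldB_eq (genes : List String)
    (a b c d e f : List String) :
    genes.foldl catStep (a, b, c, d, e, f) =
      (a ++ genes.filter (fun g =>
         PySem.Str.isIn "PSMA" (PySem.Str.upper g) || PySem.Str.isIn "PSMB" (PySem.Str.upper g)),
       b ++ genes.filter (fun g =>
         (PySem.Str.isIn "UBE" (PySem.Str.upper g) || PySem.Str.isIn "UB" (PySem.Str.upper g)) &&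
         !(PySem.Str.isIn "PSMA" (PySem.Str.upper g) || PySem.Str.isIn "PSMB" (PySem.Str.upper g))),
       c ++ genes.filter (fun g =>
         ["VDAC", "COX", "ATP", "NDUF", "SOD", "GPX", "CYCS"].any (fun m => PySem.Str.isIn m (PySem.Str.upper g))),
       d ++ genes.filter (fun g =>
         ["DUT", "PCNA", "TOP2", "MCM", "CDK", "CCNB"].any (fun c => PySem.Str.isIn c (PySem.Str.upper g))),
       e ++ genes.filter (fun g =>
         ["ATM", "CHEK", "TP53", "BRCA"].any (fun d => PySem.Str.isIn d (PySem.Str.upper g))),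
       f ++ genes.filter (fun g =>
         ["HNRNP", "MAGOH", "RNA"].any (fun r => PySem.Str.isIn r (PySem.Str.upper g)))) := by
  induction genes generalizing a b c d e f with
  | nil => simp
  | cons g gs ih =>
    simp only [List.foldl_cons, List.filter_cons, catStep]
    rw [ih]
    split_ifs <;> simp_all [List.append_assoc]

-- for g drawn from genes, membership in the filtered list is just the predicate
theorem contains_filter_of_mem {p : String → Bool} {genes : List String} {g : String}
    (h : g ∈ genes) : (genes.filter p).contains g = p g := by
  by_cases hp : p g = true
  · simp [List.mem_filter, h, hp]
  · simp only [Bool.not_eq_true] at hp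
    simp [List.mem_filter, hp]

-- A's double filter for ubiquitination equals B's fused predicate
theorem ubi_eq (genes : List String) :
    (genes.filter (fun g =>
        PySem.Str.isIn "UBE" (PySem.Str.upper g) || PySem.Str.isIn "UB" (PySem.Str.upper g))).filter
      (fun g => !((genes.filter (fun g =>
        PySem.Str.isIn "PSMA" (PySem.Str.upper g) || PySem.Str.isIn "PSMB" (PySem.Str.upper g))).contains g)) =
    genes.filter (fun g =>
      (PySem.Str.isIn "UBE" (PySem.Str.upper g) || PySem.Str.isIn "UB" (PySem.Str.upper g)) &&
      !(PySem.Str.isIn "PSMA" (PySem.Str.upper g) || PySem.Str.isIn "PSMB" (PySem.Str.upper g))) := by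
  rw [List.filter_filter]
  apply List.filter_congr
  intro g hg
  rw [contains_filter_of_mem hg]
  cases PySem.Str.isIn "UBE" (PySem.Str.upper g) <;>
    cases PySem.Str.isIn "UB" (PySem.Str.upper g) <;>
    cases PySem.Str.isIn "PSMA" (PySem.Str.upper g) <;>
    cases PySem.Str.isIn "PSMB" (PySem.Str.upper g) <;> rfl

-- ===== VERDICT (by name: the statement is the Claim_ definition above) =====
theorem categorize_genes_spec : Claim_equal_categorize_genes := by
  intro genes _
  show categorize_genes genes = categorize_genes_alt genes
  unfold categorize_genes categorize_genes_alt
  simp only [foldB_eq]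
  rw [ubi_eq]
  simp [PySem.Set.update, PySem.Set.ofList_eq_foldl, PySem.Set.empty, List.foldl_append]
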